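-- pv_equiv track=rewrite | github.com/yepyhun/Hemu | agent/core2_store.py | _select_search_terms
-- ===== SOURCE A (Python) =====
-- from typing import Any, Dict, List, Optional
--
-- SEARCH_STOPWORDS = {
--     "a",
--     "an",
--     "and",
--     "are",
--     "as",
--     "at",
--     "be",
--     "between",
--     "by",
--     "for",
--     "from",
--     "how",
--     "i",
--     "in",
--     "is",
--     "it",
--     "me",
--     "my",
--     "of",
--     "on",
--     "or",
--     "the",
--     "their",
--     "there",
--     "these",
--     "this",
--     "to",
--     "what",
--     "when",
--     "where",
--     "who",
--     "why",
-- }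
--
-- def _select_search_terms(raw_tokens: List[str]) -> List[str]:
--     for minimum in (3, 2, 1):
--         terms = [
--             term
--             for term in raw_tokens
--             if term
--             and term not in SEARCH_STOPWORDS
--             and (len(term) >= minimum or term.isdigit())
--         ]
--         if terms:
--             return terms
--     return []
-- ===== SOURCE B (Python) =====
-- SEARCH_STOPWORDS = {
--     "a", "an", "and", "are", "as", "at", "be", "between", "by", "for",
--     "from", "how", "i", "in", "is", "it", "me", "my", "of", "on", "or",
--     "the", "their", "there", "these", "this", "to", "what", "when",
--     "where", "who", "why",
-- }
--
-- def _select_search_terms(raw_tokens):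
--     r1, r2, r3 = [], [], []
--     for term in raw_tokens:
--         if not term or term in SEARCH_STOPWORDS:
--             continue
--         r1.append(term)
--         if len(term) >= 2 or term.isdigit():
--             r2.append(term)
--         if len(term) >= 3 or term.isdigit():
--             r3.append(term)
--     return r3 or r2 or r1
-- ===== Notes on version B (the rewrite author's own statement) =====
-- stated objective: alternative
-- what changed: A re-scans the whole token list up to three times (once per length threshold); B makes a single pass that builds the three candidate lists simultaneously and returns the highest-threshold non-empty one, trading pass count for per-item branch work.
import Mathlib
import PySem

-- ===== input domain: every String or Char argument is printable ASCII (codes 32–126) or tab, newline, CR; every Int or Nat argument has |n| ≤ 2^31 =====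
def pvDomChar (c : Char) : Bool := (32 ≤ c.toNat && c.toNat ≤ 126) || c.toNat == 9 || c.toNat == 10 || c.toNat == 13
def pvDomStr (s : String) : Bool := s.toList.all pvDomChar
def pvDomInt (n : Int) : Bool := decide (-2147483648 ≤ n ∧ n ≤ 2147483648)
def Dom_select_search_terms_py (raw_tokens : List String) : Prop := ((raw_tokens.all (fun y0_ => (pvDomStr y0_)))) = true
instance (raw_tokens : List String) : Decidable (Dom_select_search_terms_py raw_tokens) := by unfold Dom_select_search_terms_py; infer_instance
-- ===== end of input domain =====

-- B is a single pass over raw_tokens building all three threshold lists at once, instead of A's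
-- up-to-three full re-scans; same return value everywhere.

-- ===== PORT A =====
def pvStopwords : PySem.Set String :=
  ["a","an","and","are","as","at","be","between","by","for","from","how","i","in","is","it",
   "me","my","of","on","or","the","their","there","these","this","to","what","when","where","who","why"]

-- the list comprehension of A for one value of `minimum`
def pvTermsA (minimum : Int) (raw_tokens : List String) : List String :=
  raw_tokens.filter (fun term =>
    term ≠ "" && !(PySem.Set.contains pvStopwords term) &&
      (decide (minimum ≤ PySem.Str.len term) || PySem.Str.strIsdigit term))

-- the `for minimum in (3, 2, 1)` loop, unrolled over the literal tuple
def select_search_terms_py (raw_tokens : List String) : List String :=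
  let t3 := pvTermsA 3 raw_tokens
  if t3 ≠ [] then t3
  else
    let t2 := pvTermsA 2 raw_tokens
    if t2 ≠ [] then t2
    else
      let t1 := pvTermsA 1 raw_tokens
      if t1 ≠ [] then t1 else []

-- ===== PORT B =====
def pvStepB (st : List String × List String × List String) (term : String) :
    List String × List String × List String :=
  if term = "" || PySem.Set.contains pvStopwords term then st
  else
    let r1 := st.1 ++ [term]
    let r2 := if decide ((2:Int) ≤ PySem.Str.len term) || PySem.Str.strIsdigit term
              then st.2.1 ++ [term] else st.2.1
    let r3 := if decide ((3:Int) ≤ PySem.Str.len term) || PySem.Str.strIsdigit term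
              then st.2.2 ++ [term] else st.2.2
    (r1, r2, r3)

def select_search_terms_py_alt (raw_tokens : List String) : List String :=
  let st := raw_tokens.foldl pvStepB ([], [], [])
  if st.2.2 ≠ [] then st.2.2
  else if st.2.1 ≠ [] then st.2.1
  else st.1

-- ===== PRECONDITION & SPEC =====
def Spec_select_search_terms_py (raw_tokens : List String) (out : List String) : Prop := out = select_search_terms_py_alt raw_tokens
instance (raw_tokens : List String) (out : List String) : Decidable (Spec_select_search_terms_py raw_tokens out) := by unfold Spec_select_search_terms_py; infer_instance

-- ===== CLAIM (what is proved, stated in full; the proofs are below) =====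
def Claim_equal_select_search_terms_py : Prop := ∀ (raw_tokens : List String), Dom_select_search_terms_py raw_tokens → Spec_select_search_terms_py raw_tokens (select_search_terms_py raw_tokens)

-- ===== LEMMAS AND PROOFS =====

-- a nonempty string has length ≥ 1, so A's minimum=1 filter keeps exactly the non-stopword nonempty tokens
lemma pvTermsA_one (raw_tokens : List String) :
    pvTermsA 1 raw_tokens =
      raw_tokens.filter (fun term => term ≠ "" && !(PySem.Set.contains pvStopwords term)) := by
  unfold pvTermsA
  apply List.filter_congr
  intro t _
  by_cases h : t = ""
  · simp [h]
  · have hlen : 0 < t.length := by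
      have h1 : t.toList ≠ [] := by simpa using h
      simpa using List.length_pos_iff.mpr h1
    simp [h]
    intro _
    left
    omega

-- the single pass accumulates exactly A's three filtered lists
lemma pvFold_spec (raw_tokens : List String) :
    ∀ a b c, raw_tokens.foldl pvStepB (a, b, c) =
      (a ++ pvTermsA 1 raw_tokens, b ++ pvTermsA 2 raw_tokens, c ++ pvTermsA 3 raw_tokens) := by
  induction raw_tokens with
  | nil => intro a b c; simp [pvTermsA]
  | cons t ts ih =>
    intro a b c
    simp only [List.foldl_cons]
    rw [pvTermsA_one] at ih ⊢
    by_cases h0 : t = ""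
    · simp [pvStepB, h0, pvTermsA, ih]
    · by_cases hsw : t ∈ pvStopwords
      · simp [pvStepB, h0, hsw, pvTermsA, ih]
      · by_cases h2 : (2 ≤ t.length ∨ PySem.Chars.strIsdigit t.toList = true)
        · by_cases h3 : (3 ≤ t.length ∨ PySem.Chars.strIsdigit t.toList = true)
          · simp [pvStepB, h0, hsw, h2, h3, pvTermsA, ih]
          · simp [pvStepB, h0, hsw, h2, h3, pvTermsA, ih]
        · have h3 : ¬ (3 ≤ t.length ∨ PySem.Chars.strIsdigit t.toList = true) := by
            rcases not_or.mp h2 with ⟨ha, hb⟩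
            exact not_or.mpr ⟨by omega, hb⟩
          simp [pvStepB, h0, hsw, h2, h3, pvTermsA, ih]

-- ===== VERDICT (by name: the statement is the Claim_ definition above) =====
theorem select_search_terms_py_spec : Claim_equal_select_search_terms_py := by
  intro raw_tokens _
  unfold Spec_select_search_terms_py select_search_terms_py select_search_terms_py_alt
  rw [pvFold_spec raw_tokens [] [] []]
  simp only [List.nil_append]
  by_cases h3 : pvTermsA 3 raw_tokens = [] <;>
    by_cases h2 : pvTermsA 2 raw_tokens = [] <;>
      by_cases h1 : pvTermsA 1 raw_tokens = [] <;>
        simp [h1, h2, h3]
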